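-- pv_equiv track=rewrite | github.com/MinKapout/ChainReaction | 3.6.1.py | alignementDiagonales
-- ===== SOURCE A (Python) =====
-- def alignementDiagonales(joueur, plateau=[[]]):
--     total1 = 0
--     total2 = 0
--     for i in range(len(plateau)):
--         if plateau[i][i] == joueur:
--             total1 += 1
--         else:
--             total1 = 0
--
--         if plateau[i][len(plateau)-1-i] == joueur:
--             total2 += 1
--         else:
--             total2 = 0
--     return total1 >= 3 or total2 >= 3
-- ===== SOURCE B (Python) =====
-- def alignementDiagonales(joueur, plateau=[[]]):
--     n = len(plateau)
--     d1 = [plateau[i][i] for i in range(n)]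
--     d2 = [plateau[i][n - 1 - i] for i in range(n)]
--
--     def run(d):
--         c = 0
--         for x in reversed(d):
--             if x != joueur:
--                 break
--             c += 1
--         return c
--
--     return run(d1) >= 3 or run(d2) >= 3
-- ===== Notes on version B (the rewrite author's own statement) =====
-- stated objective: alternative
-- what changed: B materializes the two diagonals as lists and computes each one's trailing run of cells equal to joueur by a backward scan that stops at the first mismatch, instead of A's forward counters that reset to zero; Pre_ excludes boards where a row is too short for its diagonal index, on which A raises IndexError.
import Mathlib
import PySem

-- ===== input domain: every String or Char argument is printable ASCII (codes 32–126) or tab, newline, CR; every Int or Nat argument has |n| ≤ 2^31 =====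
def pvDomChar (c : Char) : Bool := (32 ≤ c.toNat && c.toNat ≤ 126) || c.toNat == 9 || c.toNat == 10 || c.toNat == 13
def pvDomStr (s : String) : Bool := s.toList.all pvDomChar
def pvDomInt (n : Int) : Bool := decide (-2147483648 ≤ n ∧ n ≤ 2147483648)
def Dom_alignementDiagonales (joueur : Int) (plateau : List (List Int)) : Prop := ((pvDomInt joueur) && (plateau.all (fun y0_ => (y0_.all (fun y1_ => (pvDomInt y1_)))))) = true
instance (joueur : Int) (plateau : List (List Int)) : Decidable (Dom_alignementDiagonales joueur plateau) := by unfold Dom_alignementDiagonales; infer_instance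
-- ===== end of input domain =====

-- B: materialize the diagonals and measure each one's trailing run by a backward scan, instead of A's resetting forward counters; same cost, different decomposition.
-- ===== PORT A =====
-- list indexing plateau[i][i] / plateau[i][n-1-i]: getD is exact here because Pre_ puts both indices in range (Python raises IndexError otherwise, excluded by Pre_)
def alignementDiagonales (joueur : Int) (plateau : List (List Int)) : Bool :=
  let n := plateau.length
  let st := (List.range n).foldl (fun (t : Int × Int) i =>
      ( if (plateau.getD i []).getD i 0 = joueur then t.1 + 1 else 0,
        if (plateau.getD i []).getD (n - 1 - i) 0 = joueur then t.2 + 1 else 0)) (0, 0)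
  decide (st.1 ≥ 3) || decide (st.2 ≥ 3)

-- ===== PORT B =====
-- backward scan counting matches until the first mismatch (Source B's `run` over reversed(d))
def pvRunRev (j : Int) : List Int → Int
  | [] => 0
  | x :: xs => if x = j then 1 + pvRunRev j xs else 0

def alignementDiagonales_alt (joueur : Int) (plateau : List (List Int)) : Bool :=
  let n := plateau.length
  let d1 := (List.range n).map (fun i => (plateau.getD i []).getD i 0)
  let d2 := (List.range n).map (fun i => (plateau.getD i []).getD (n - 1 - i) 0)
  decide (pvRunRev joueur d1.reverse ≥ 3) || decide (pvRunRev joueur d2.reverse ≥ 3)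

-- ===== PRECONDITION & SPEC =====
-- Pre_ excludes exactly the boards on which A raises IndexError: some row i is too short for index i or n-1-i.
def Pre_alignementDiagonales (joueur : Int) (plateau : List (List Int)) : Prop :=
  ∀ i, i < plateau.length →
    i < (plateau.getD i []).length ∧ plateau.length - 1 - i < (plateau.getD i []).length
instance (joueur : Int) (plateau : List (List Int)) : Decidable (Pre_alignementDiagonales joueur plateau) := by
  unfold Pre_alignementDiagonales; infer_instance
def pvWitness_alignementDiagonales : Int × List (List Int) := (1, [[1,0,0],[0,1,0],[0,0,1]])

def Spec_alignementDiagonales (joueur : Int) (plateau : List (List Int)) (out : Bool) : Prop := out = alignementDiagonales_alt joueur plateau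
instance (joueur : Int) (plateau : List (List Int)) (out : Bool) : Decidable (Spec_alignementDiagonales joueur plateau out) := by unfold Spec_alignementDiagonales; infer_instance

-- ===== CLAIM (what is proved, stated in full; the proofs are below) =====
def Claim_equal_alignementDiagonales : Prop := ∀ (joueur : Int) (plateau : List (List Int)), Dom_alignementDiagonales joueur plateau → Pre_alignementDiagonales joueur plateau → Spec_alignementDiagonales joueur plateau (alignementDiagonales joueur plateau)

-- ===== LEMMAS AND PROOFS =====
theorem pv_foldl_prod_if {α : Type} (l : List α) (P Q : α → Prop)
    [DecidablePred P] [DecidablePred Q] (a b : Int) :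
    l.foldl (fun (t : Int × Int) i =>
        (if P i then t.1 + 1 else 0, if Q i then t.2 + 1 else 0)) (a, b)
      = (l.foldl (fun t i => if P i then t + 1 else 0) a,
         l.foldl (fun t i => if Q i then t + 1 else 0) b) := by
  induction l generalizing a b with
  | nil => rfl
  | cons x xs ih => simp only [List.foldl_cons]; rw [ih]

theorem pv_reset_foldl_eq_runRev (j : Int) (l : List Int) :
    l.foldl (fun t x => if x = j then t + 1 else 0) 0 = pvRunRev j l.reverse := by
  induction l using List.reverseRecOn with
  | nil => simp [pvRunRev]
  | append_singleton l x ih =>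
    rw [List.foldl_append]
    simp only [List.foldl_cons, List.foldl_nil, List.reverse_append,
      List.reverse_singleton, List.singleton_append, pvRunRev]
    split_ifs <;> omega

-- ===== VERDICT (by name: the statement is the Claim_ definition above) =====
theorem alignementDiagonales_spec : Claim_equal_alignementDiagonales := by
  intro joueur plateau _ _
  unfold Spec_alignementDiagonales alignementDiagonales alignementDiagonales_alt
  simp only [← pv_reset_foldl_eq_runRev, List.foldl_map, pv_foldl_prod_if]
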